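-- pv_equiv track=rewrite | github.com/NeoMindStd/CodingLife | baekjoon/1260py/a.py | dfs
-- ===== SOURCE A (Python) =====
-- def dfs(n, m, v, l):
--     result = [v]
--     stack = [v]
--     check = dict()
--     for i in range(1, n+1):
--         check[i] = False
--     check[v] = True
--
--     while len(stack) > 0:
--         tmp = []
--         for line in l:
--             if line[0] == stack[-1] and not check[line[1]]:
--                 tmp.append(line[1])
--             elif line[1] == stack[-1] and not check[line[0]]:
--                 tmp.append(line[0])
--         if len(tmp) == 0:
--             stack.pop()
--         else:
--             point = min(tmp)
--             stack.append(point)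
--             result.append(point)
--             check[point] = True
--     return result
-- ===== SOURCE B (Python) =====
-- def dfs(n, m, v, l):
--     # Build an adjacency dict once (both directions), then DFS over it,
--     # taking at each step the smallest unvisited neighbor of the stack top.
--     adj = {}
--     for a, b in [(x[0], x[1]) for x in l] + [(x[1], x[0]) for x in l]:
--         adj.setdefault(a, []).append(b)
--     visited = {v}
--     result = [v]
--     stack = [v]
--     while stack:
--         u = stack[-1]
--         nxt = next((w for w in sorted(adj.get(u, [])) if w not in visited), None)
--         if nxt is None:
--             stack.pop()
--         else:
--             visited.add(nxt)
--             result.append(nxt)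
--             stack.append(nxt)
--     return result
-- ===== Notes on version B (the rewrite author's own statement) =====
-- stated objective: alternative
-- what changed: B builds an adjacency dict once and DFS-scans only the stack top's sorted neighbor list per step, instead of A's rescan of the whole edge list on every loop iteration.
-- outside the precondition, e.g. on dfs(2, 1, 1, [[2, 9]]): A returns [1], B returns [1]
import Mathlib
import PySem

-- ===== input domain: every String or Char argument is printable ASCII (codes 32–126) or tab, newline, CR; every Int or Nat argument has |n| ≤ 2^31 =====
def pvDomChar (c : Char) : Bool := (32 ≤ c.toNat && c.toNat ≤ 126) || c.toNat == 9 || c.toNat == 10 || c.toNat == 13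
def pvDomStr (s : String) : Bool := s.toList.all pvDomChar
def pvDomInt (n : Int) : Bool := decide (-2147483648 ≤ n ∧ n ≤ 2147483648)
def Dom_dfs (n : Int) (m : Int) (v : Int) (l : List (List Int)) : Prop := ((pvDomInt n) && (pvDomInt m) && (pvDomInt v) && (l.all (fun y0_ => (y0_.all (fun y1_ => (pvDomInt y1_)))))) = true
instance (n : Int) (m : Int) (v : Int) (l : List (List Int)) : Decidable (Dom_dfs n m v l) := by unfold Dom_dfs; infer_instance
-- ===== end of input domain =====

-- B replaces A's full edge-list scan per loop iteration by an adjacency dict built once,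
-- taking each step the smallest unvisited neighbor of the stack top (alternative data structure; return value only, A mutates no argument).

-- ===== PORT A =====
-- inner 'for line in l' loop building tmp (the stack is kept head-first: head = Python stack[-1],
-- cons = append, tail = pop; 'check[x]' lookups are total via getD — Pre_ keeps every looked-up
-- key present, KeyError/IndexError inputs are outside Pre_)
def dfsTmpA (l : List (List Int)) (check : PySem.Dict Int Bool) (top : Int) : List Int :=
  l.foldl (fun tmp line =>
    if PySem.List.pyGetD line 0 0 = top ∧ check.getD (PySem.List.pyGetD line 1 0) true = false then
      tmp ++ [PySem.List.pyGetD line 1 0]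
    else if PySem.List.pyGetD line 1 0 = top ∧ check.getD (PySem.List.pyGetD line 0 0) true = false then
      tmp ++ [PySem.List.pyGetD line 0 0]
    else tmp) []

-- the 'while len(stack) > 0' loop; fuel only makes the recursion total (each iteration pops or
-- marks a fresh vertex, so 2*n + 4*len(l) + 4 steps always suffice)
def dfsLoopA (l : List (List Int)) (fuel : Nat) (check : PySem.Dict Int Bool)
    (stack result : List Int) : List Int :=
  match fuel with
  | 0 => result
  | fuel + 1 =>
    match stack with
    | [] => result
    | top :: rest =>
      let tmp := dfsTmpA l check top
      if tmp = [] then dfsLoopA l fuel check rest result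
      else
        let point := (PySem.List.min? tmp (fun x => x)).getD 0
        dfsLoopA l fuel (check.insert point true) (point :: top :: rest) (result ++ [point])

def dfs (n : Int) (m : Int) (v : Int) (l : List (List Int)) : List Int :=
  dfsLoopA l (2 * n.toNat + 4 * l.length + 4)
    (((PySem.List.pyRange 1 (n + 1) 1).foldl (fun d i => d.insert i false) PySem.Dict.empty).insert v true)
    [v] [v]

-- ===== PORT B =====
-- '[(x[0], x[1]) for x in l] + [(x[1], x[0]) for x in l]'
def adjPairs (l : List (List Int)) : List (Int × Int) :=
  l.map (fun x => (PySem.List.pyGetD x 0 0, PySem.List.pyGetD x 1 0)) ++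
  l.map (fun x => (PySem.List.pyGetD x 1 0, PySem.List.pyGetD x 0 0))

-- 'adj.setdefault(a, []).append(b)' loop
def adjBuild (l : List (List Int)) : PySem.Dict Int (List Int) :=
  (adjPairs l).foldl (fun d p => d.modify p.1 [] (· ++ [p.2])) PySem.Dict.empty

-- the 'while stack' loop; 'next((w for w in sorted(adj.get(u, [])) if w not in visited), None)'
-- is List.find? on the sorted neighbor list; same fuel guard as A's loop
def dfsLoopB (adj : PySem.Dict Int (List Int)) (fuel : Nat) (vis : PySem.Set Int)
    (stack result : List Int) : List Int :=
  match fuel with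
  | 0 => result
  | fuel + 1 =>
    match stack with
    | [] => result
    | u :: rest =>
      match (PySem.List.sorted (adj.getD u []) (fun w => w)).find?
              (fun w => !(PySem.Set.contains vis w)) with
      | none => dfsLoopB adj fuel vis rest result
      | some w => dfsLoopB adj fuel (PySem.Set.add vis w) (w :: u :: rest) (result ++ [w])

def dfs_alt (n : Int) (m : Int) (v : Int) (l : List (List Int)) : List Int :=
  dfsLoopB (adjBuild l) (2 * n.toNat + 4 * l.length + 4) (PySem.Set.ofList [v]) [v] [v]

-- ===== PRECONDITION & SPEC =====
-- Pre_ excludes inputs where A raises IndexError (a line shorter than 2) or may raise KeyError: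
-- only vertices of K = [1,n] ∪ {v} are keys of check and only they can reach the stack top, so a
-- line with one endpoint inside K and the other outside may trigger check[outside]; this closed-form
-- sufficient condition also excludes some inputs where that lookup never executes and A still
-- returns — B returns the same value there anyway.
def Pre_dfs (n : Int) (m : Int) (v : Int) (l : List (List Int)) : Prop :=
  ∀ line ∈ l, 2 ≤ line.length ∧
    (((1 ≤ PySem.List.pyGetD line 0 0 ∧ PySem.List.pyGetD line 0 0 ≤ n) ∨ PySem.List.pyGetD line 0 0 = v) ↔
     ((1 ≤ PySem.List.pyGetD line 1 0 ∧ PySem.List.pyGetD line 1 0 ≤ n) ∨ PySem.List.pyGetD line 1 0 = v))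
instance (n : Int) (m : Int) (v : Int) (l : List (List Int)) : Decidable (Pre_dfs n m v l) := by
  unfold Pre_dfs; infer_instance

def pvWitness_dfs : Int × Int × Int × List (List Int) :=
  (4, 5, 1, [[1, 2], [1, 3], [2, 4], [3, 4], [4, 2]])

def Spec_dfs (n : Int) (m : Int) (v : Int) (l : List (List Int)) (out : List Int) : Prop := out = dfs_alt n m v l
instance (n : Int) (m : Int) (v : Int) (l : List (List Int)) (out : List Int) : Decidable (Spec_dfs n m v l out) := by unfold Spec_dfs; infer_instance

-- ===== CLAIM (what is proved, stated in full; the proofs are below) =====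
def Claim_equal_dfs : Prop := ∀ (n : Int) (m : Int) (v : Int) (l : List (List Int)), Dom_dfs n m v l → Pre_dfs n m v l → Spec_dfs n m v l (dfs n m v l)

-- ===== LEMMAS AND PROOFS =====

-- neighbors of u recorded in B's adjacency dict
theorem mem_adjBuild (l : List (List Int)) (u x : Int) :
    x ∈ (adjBuild l).getD u [] ↔
      ∃ line ∈ l, (PySem.List.pyGetD line 0 0 = u ∧ PySem.List.pyGetD line 1 0 = x) ∨
                  (PySem.List.pyGetD line 1 0 = u ∧ PySem.List.pyGetD line 0 0 = x) := by
  unfold adjBuild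
  rw [PySem.Dict.getD_foldl_modify_append]
  simp only [PySem.Dict.getD_empty, List.nil_append, List.mem_map, List.mem_filter, adjPairs,
    List.mem_append]
  constructor
  · rintro ⟨p, ⟨hp | hp, hpu⟩, rfl⟩
    · obtain ⟨line, hl, rfl⟩ := hp
      exact ⟨line, hl, Or.inl ⟨by simpa using hpu, rfl⟩⟩
    · obtain ⟨line, hl, rfl⟩ := hp
      exact ⟨line, hl, Or.inr ⟨by simpa using hpu, rfl⟩⟩
  · rintro ⟨line, hl, ⟨h0, h1⟩ | ⟨h1, h0⟩⟩
    · exact ⟨(PySem.List.pyGetD line 0 0, PySem.List.pyGetD line 1 0),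
        ⟨Or.inl ⟨line, hl, rfl⟩, by simpa using h0⟩, h1⟩
    · exact ⟨(PySem.List.pyGetD line 1 0, PySem.List.pyGetD line 0 0),
        ⟨Or.inr ⟨line, hl, rfl⟩, by simpa using h1⟩, h0⟩

-- membership in A's tmp list (generalized accumulator)
theorem mem_tmpA_aux (l : List (List Int)) (check : PySem.Dict Int Bool) (top : Int) :
    ∀ (acc : List Int) (x : Int),
      x ∈ l.foldl (fun tmp line =>
        if PySem.List.pyGetD line 0 0 = top ∧ check.getD (PySem.List.pyGetD line 1 0) true = false then
          tmp ++ [PySem.List.pyGetD line 1 0]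
        else if PySem.List.pyGetD line 1 0 = top ∧ check.getD (PySem.List.pyGetD line 0 0) true = false then
          tmp ++ [PySem.List.pyGetD line 0 0]
        else tmp) acc ↔
      x ∈ acc ∨ ∃ line ∈ l,
        ((PySem.List.pyGetD line 0 0 = top ∧ check.getD (PySem.List.pyGetD line 1 0) true = false) ∧
          x = PySem.List.pyGetD line 1 0) ∨
        (¬(PySem.List.pyGetD line 0 0 = top ∧ check.getD (PySem.List.pyGetD line 1 0) true = false) ∧
          (PySem.List.pyGetD line 1 0 = top ∧ check.getD (PySem.List.pyGetD line 0 0) true = false) ∧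
          x = PySem.List.pyGetD line 0 0) := by
  induction l with
  | nil => simp
  | cons line t ih =>
    intro acc x
    simp only [List.foldl_cons, List.mem_cons]
    rw [ih]
    by_cases h1 : PySem.List.pyGetD line 0 0 = top ∧ check.getD (PySem.List.pyGetD line 1 0) true = false
    · simp only [if_pos h1, List.mem_append, List.mem_singleton]
      constructor
      · rintro (⟨hx | hx⟩ | ⟨ln, hln, hc⟩)
        · exact Or.inl hx
        · exact Or.inr ⟨line, Or.inl rfl, Or.inl ⟨h1, hx⟩⟩
        · exact Or.inr ⟨ln, Or.inr hln, hc⟩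
      · rintro (hx | ⟨ln, (rfl | hln), hc⟩)
        · exact Or.inl (Or.inl hx)
        · rcases hc with ⟨_, hx⟩ | ⟨hn, _, _⟩
          · exact Or.inl (Or.inr hx)
          · exact absurd h1 hn
        · exact Or.inr ⟨ln, hln, hc⟩
    · by_cases h2 : PySem.List.pyGetD line 1 0 = top ∧ check.getD (PySem.List.pyGetD line 0 0) true = false
      · simp only [if_neg h1, if_pos h2, List.mem_append, List.mem_singleton]
        constructor
        · rintro (⟨hx | hx⟩ | ⟨ln, hln, hc⟩)
          · exact Or.inl hx
          · exact Or.inr ⟨line, Or.inl rfl, Or.inr ⟨h1, h2, hx⟩⟩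
          · exact Or.inr ⟨ln, Or.inr hln, hc⟩
        · rintro (hx | ⟨ln, (rfl | hln), hc⟩)
          · exact Or.inl (Or.inl hx)
          · rcases hc with ⟨hh, _⟩ | ⟨_, _, hx⟩
            · exact absurd hh h1
            · exact Or.inl (Or.inr hx)
          · exact Or.inr ⟨ln, hln, hc⟩
      · simp only [if_neg h1, if_neg h2]
        constructor
        · rintro (hx | ⟨ln, hln, hc⟩)
          · exact Or.inl hx
          · exact Or.inr ⟨ln, Or.inr hln, hc⟩
        · rintro (hx | ⟨ln, (rfl | hln), hc⟩)
          · exact Or.inl hx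
          · rcases hc with ⟨hh, _⟩ | ⟨_, hh, _⟩
            · exact absurd hh h1
            · exact absurd hh h2
          · exact Or.inr ⟨ln, hln, hc⟩

-- with the stack top already visited, tmp's members are exactly the unvisited neighbors
theorem mem_tmpA (l : List (List Int)) (check : PySem.Dict Int Bool) (top x : Int)
    (htop : check.getD top true = true) :
    x ∈ dfsTmpA l check top ↔
      (∃ line ∈ l, (PySem.List.pyGetD line 0 0 = top ∧ PySem.List.pyGetD line 1 0 = x) ∨
                   (PySem.List.pyGetD line 1 0 = top ∧ PySem.List.pyGetD line 0 0 = x)) ∧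
      check.getD x true = false := by
  unfold dfsTmpA
  rw [mem_tmpA_aux]
  simp only [List.not_mem_nil, false_or]
  constructor
  · rintro ⟨line, hl, ⟨⟨h0, hu⟩, rfl⟩ | ⟨_, ⟨h1, hu⟩, rfl⟩⟩
    · exact ⟨⟨line, hl, Or.inl ⟨h0, rfl⟩⟩, hu⟩
    · exact ⟨⟨line, hl, Or.inr ⟨h1, rfl⟩⟩, hu⟩
  · rintro ⟨⟨line, hl, ⟨h0, h1⟩ | ⟨h1, h0⟩⟩, hu⟩
    · exact ⟨line, hl, Or.inl ⟨⟨h0, h1 ▸ hu⟩, h1.symm⟩⟩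
    · refine ⟨line, hl, Or.inr ⟨?_, ⟨h1, h0 ▸ hu⟩, h0.symm⟩⟩
      rintro ⟨ha, hb⟩
      rw [h1] at hb
      rw [htop] at hb
      simp at hb
-- first match in a ≤-sorted list is ≤ every later match
theorem find?_pairwise_isMin (S : List Int) (p : Int → Bool) (w : Int)
    (hs : S.Pairwise (· ≤ ·)) (hw : S.find? p = some w) :
    ∀ x ∈ S, p x = true → w ≤ x := by
  induction S with
  | nil => simp at hw
  | cons a t ih =>
    rcases List.pairwise_cons.mp hs with ⟨hat, ht⟩
    by_cases hpa : p a = true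
    · rw [List.find?_cons, hpa] at hw
      cases hw
      intro x hx _
      rcases List.mem_cons.mp hx with rfl | hx
      · exact le_refl _
      · exact hat x hx
    · have hpa' : p a = false := by simpa using hpa
      rw [List.find?_cons, hpa'] at hw
      intro x hx hpx
      rcases List.mem_cons.mp hx with rfl | hx
      · exact absurd hpx hpa
      · exact ih ht hw x hx hpx

-- one-step unfoldings of the two loops (definitional)
theorem dfsLoopA_cons (l : List (List Int)) (f : Nat) (check : PySem.Dict Int Bool)
    (top : Int) (rest result : List Int) :
    dfsLoopA l (f + 1) check (top :: rest) result =
      (if dfsTmpA l check top = [] then dfsLoopA l f check rest result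
       else dfsLoopA l f (check.insert ((PySem.List.min? (dfsTmpA l check top) (fun x => x)).getD 0) true)
              (((PySem.List.min? (dfsTmpA l check top) (fun x => x)).getD 0) :: top :: rest)
              (result ++ [(PySem.List.min? (dfsTmpA l check top) (fun x => x)).getD 0])) := rfl

theorem dfsLoopB_cons (adj : PySem.Dict Int (List Int)) (f : Nat) (vis : PySem.Set Int)
    (u : Int) (rest result : List Int) :
    dfsLoopB adj (f + 1) vis (u :: rest) result =
      (match (PySem.List.sorted (adj.getD u []) (fun w => w)).find?
               (fun w => !(PySem.Set.contains vis w)) with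
       | none => dfsLoopB adj f vis rest result
       | some w => dfsLoopB adj f (vis.add w) (w :: u :: rest) (result ++ [w])) := rfl

-- one loop step computes the same choice: min of A's tmp = first unvisited in B's sorted adjacency
-- (K is the key set of check; every line has both endpoints inside or both outside K)
theorem step_eq (l : List (List Int)) (check : PySem.Dict Int Bool) (vis : PySem.Set Int)
    (K : Int → Prop) (top : Int)
    (hK : ∀ line ∈ l, (K (PySem.List.pyGetD line 0 0) ↔ K (PySem.List.pyGetD line 1 0)))
    (hrel : ∀ line ∈ l,
      (K (PySem.List.pyGetD line 0 0) →
        (check.getD (PySem.List.pyGetD line 0 0) true = false ↔ PySem.List.pyGetD line 0 0 ∉ vis)) ∧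
      (K (PySem.List.pyGetD line 1 0) →
        (check.getD (PySem.List.pyGetD line 1 0) true = false ↔ PySem.List.pyGetD line 1 0 ∉ vis)))
    (htopK : K top) (htop : check.getD top true = true) :
    PySem.List.min? (dfsTmpA l check top) (fun x => x) =
      (PySem.List.sorted ((adjBuild l).getD top []) (fun w => w)).find?
        (fun w => !(PySem.Set.contains vis w)) := by
  set S := PySem.List.sorted ((adjBuild l).getD top []) (fun w => w) with hSdef
  have hS : S.Pairwise (· ≤ ·) := by
    simpa using PySem.List.sorted_pairwise ((adjBuild l).getD top []) (fun w => w)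
  have hpred : ∀ x : Int, ((!(PySem.Set.contains vis x)) = true) ↔ x ∉ vis := by
    intro x; simp [PySem.Set.contains]
  have hmem : ∀ x : Int, x ∈ dfsTmpA l check top ↔ x ∈ S ∧ x ∉ vis := by
    intro x
    rw [mem_tmpA l check top x htop]
    constructor
    · rintro ⟨⟨line, hl, hc⟩, hu⟩
      refine ⟨by rw [hSdef, PySem.List.mem_sorted, mem_adjBuild]; exact ⟨line, hl, hc⟩, ?_⟩
      rcases hc with ⟨h0, h1⟩ | ⟨h1, h0⟩
      · have hKx : K (PySem.List.pyGetD line 1 0) := (hK line hl).mp (h0 ▸ htopK)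
        have := (hrel line hl).2 hKx; rw [h1] at this; exact this.mp hu
      · have hKx : K (PySem.List.pyGetD line 0 0) := (hK line hl).mpr (h1 ▸ htopK)
        have := (hrel line hl).1 hKx; rw [h0] at this; exact this.mp hu
    · rintro ⟨hxS, hxv⟩
      rw [hSdef, PySem.List.mem_sorted, mem_adjBuild] at hxS
      obtain ⟨line, hl, hc⟩ := hxS
      refine ⟨⟨line, hl, hc⟩, ?_⟩
      rcases hc with ⟨h0, h1⟩ | ⟨h1, h0⟩
      · have hKx : K (PySem.List.pyGetD line 1 0) := (hK line hl).mp (h0 ▸ htopK)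
        have := (hrel line hl).2 hKx; rw [h1] at this; exact this.mpr hxv
      · have hKx : K (PySem.List.pyGetD line 0 0) := (hK line hl).mpr (h1 ▸ htopK)
        have := (hrel line hl).1 hKx; rw [h0] at this; exact this.mpr hxv
  cases hfind : S.find? (fun w => !(PySem.Set.contains vis w)) with
  | none =>
    have hnone := List.find?_eq_none.mp hfind
    have hempty : dfsTmpA l check top = [] := by
      cases h : dfsTmpA l check top with
      | nil => rfl
      | cons y ys =>
        exfalso
        have hy : y ∈ dfsTmpA l check top := by rw [h]; exact List.mem_cons_self
        rcases (hmem y).mp hy with ⟨hyS, hyv⟩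
        exact (hnone y hyS) ((hpred y).mpr hyv)
    rw [hempty, (PySem.List.min?_eq_none_iff [] (fun x : Int => x)).mpr rfl]
  | some w =>
    have hwS : w ∈ S := List.mem_of_find?_eq_some hfind
    have hwv : w ∉ vis := (hpred w).mp
      (List.find?_some (p := fun w => !(PySem.Set.contains vis w)) hfind)
    have hwmin := find?_pairwise_isMin S (fun w => !(PySem.Set.contains vis w)) w hS hfind
    have hwtmp : w ∈ dfsTmpA l check top := (hmem w).mpr ⟨hwS, hwv⟩
    cases hmin : PySem.List.min? (dfsTmpA l check top) (fun x : Int => x) with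
    | none =>
      rw [PySem.List.min?_eq_none_iff] at hmin
      rw [hmin] at hwtmp
      exact absurd hwtmp List.not_mem_nil
    | some mm =>
      have h1 : mm ≤ w := PySem.List.min?_isMin hmin w hwtmp
      have h2 : w ≤ mm := by
        rcases (hmem mm).mp (PySem.List.min?_mem hmin) with ⟨hmmS, hmmv⟩
        exact hwmin mm hmmS ((hpred mm).mpr hmmv)
      rw [le_antisymm h1 h2]

-- the two loops compute the same result from related states
theorem loop_eq (l : List (List Int)) (K : Int → Prop)
    (hK : ∀ line ∈ l, (K (PySem.List.pyGetD line 0 0) ↔ K (PySem.List.pyGetD line 1 0))) :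
    ∀ (fuel : Nat) (check : PySem.Dict Int Bool) (vis : PySem.Set Int) (stack result : List Int),
      (∀ line ∈ l,
        (K (PySem.List.pyGetD line 0 0) →
          (check.getD (PySem.List.pyGetD line 0 0) true = false ↔ PySem.List.pyGetD line 0 0 ∉ vis)) ∧
        (K (PySem.List.pyGetD line 1 0) →
          (check.getD (PySem.List.pyGetD line 1 0) true = false ↔ PySem.List.pyGetD line 1 0 ∉ vis))) →
      (∀ u ∈ stack, K u ∧ check.getD u true = true ∧ u ∈ vis) →
      dfsLoopA l fuel check stack result = dfsLoopB (adjBuild l) fuel vis stack result := by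
  intro fuel
  induction fuel with
  | zero => intro check vis stack result _ _; rfl
  | succ f ih =>
    intro check vis stack result hrel hstack
    cases stack with
    | nil => rfl
    | cons top rest =>
      obtain ⟨htopK, htopc, htopv⟩ := hstack top List.mem_cons_self
      have hstep := step_eq l check vis K top hK hrel htopK htopc
      cases hfind : (PySem.List.sorted ((adjBuild l).getD top []) (fun w => w)).find?
          (fun w => !(PySem.Set.contains vis w)) with
      | none =>
        have hempty : dfsTmpA l check top = [] := by
          rw [← PySem.List.min?_eq_none_iff (key := fun x : Int => x), hstep, hfind]
        rw [dfsLoopA_cons, if_pos hempty, dfsLoopB_cons, hfind]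
        exact ih check vis rest result hrel (fun u hu => hstack u (List.mem_cons_of_mem _ hu))
      | some w =>
        have hmin : PySem.List.min? (dfsTmpA l check top) (fun x : Int => x) = some w := by
          rw [hstep, hfind]
        have hne : dfsTmpA l check top ≠ [] := by
          intro h
          rw [(PySem.List.min?_eq_none_iff (dfsTmpA l check top) (fun x : Int => x)).mpr h] at hmin
          simp at hmin
        have hwK : K w := by
          have hwtmp := PySem.List.min?_mem hmin
          rw [mem_tmpA l check top w htopc] at hwtmp
          obtain ⟨⟨line, hl, hc⟩, -⟩ := hwtmp
          rcases hc with ⟨h0, h1⟩ | ⟨h1, h0⟩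
          · exact h1 ▸ (hK line hl).mp (h0 ▸ htopK)
          · exact h0 ▸ (hK line hl).mpr (h1 ▸ htopK)
        rw [dfsLoopA_cons, if_neg hne, hmin, dfsLoopB_cons, hfind]
        apply ih
        · intro line hl
          obtain ⟨r0, r1⟩ := hrel line hl
          constructor
          · intro hKx
            rw [PySem.Dict.getD_insert]
            by_cases he : PySem.List.pyGetD line 0 0 = w
            · simp [he, PySem.Set.mem_add]
            · simp [he, PySem.Set.mem_add, r0 hKx]
          · intro hKx
            rw [PySem.Dict.getD_insert]
            by_cases he : PySem.List.pyGetD line 1 0 = w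
            · simp [he, PySem.Set.mem_add]
            · simp [he, PySem.Set.mem_add, r1 hKx]
        · intro u hu
          rcases List.mem_cons.mp hu with rfl | hu
          · exact ⟨hwK, PySem.Dict.getD_insert_self _ _ _ _,
              (PySem.Set.mem_add vis u u).mpr (Or.inr rfl)⟩
          · obtain ⟨huK, hc, hv⟩ := hstack u hu
            refine ⟨huK, ?_, (PySem.Set.mem_add vis w u).mpr (Or.inl hv)⟩
            rw [PySem.Dict.getD_insert]
            split_ifs <;> [rfl; exact hc]

-- the initial check dict: getD after the range-fold of inserts
theorem getD_foldl_insert_false (xs : List Int) :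
    ∀ (d : PySem.Dict Int Bool) (k : Int),
      (xs.foldl (fun d i => d.insert i false) d).getD k true =
        if k ∈ xs then false else d.getD k true := by
  induction xs with
  | nil => simp
  | cons a t ih =>
    intro d k
    simp only [List.foldl_cons, List.mem_cons]
    rw [ih]
    by_cases hk : k ∈ t
    · simp [hk]
    · by_cases hka : k = a
      · simp [hka]
      · simp [hk, hka, PySem.Dict.getD_insert]

-- the initial check/visited states are related on every vertex Pre_ admits
theorem init_rel (n v g : Int)
    (hg : (1 ≤ g ∧ g ≤ n) ∨ g = v) :
    (((PySem.List.pyRange 1 (n + 1) 1).foldl (fun d i => d.insert i false)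
        PySem.Dict.empty).insert v true).getD g true = false ↔ g ∉ PySem.Set.ofList [v] := by
  rw [PySem.Dict.getD_insert]
  by_cases he : g = v
  · simp [he, PySem.Set.mem_ofList]
  · rw [if_neg he, getD_foldl_insert_false]
    rcases hg with ⟨h1, h2⟩ | h
    · rw [if_pos (PySem.List.mem_pyRange_one.mpr ⟨h1, by omega⟩)]
      simp [PySem.Set.mem_ofList, he]
    · exact absurd h he

-- ===== VERDICT (by name: the statement is the Claim_ definition above) =====
theorem dfs_spec : Claim_equal_dfs := by
  intro n m v l _ hpre
  unfold Spec_dfs dfs dfs_alt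
  apply loop_eq l (fun x => (1 ≤ x ∧ x ≤ n) ∨ x = v)
  · intro line hl
    exact (hpre line hl).2
  · intro line hl
    exact ⟨fun h => init_rel n v _ h, fun h => init_rel n v _ h⟩
  · intro u hu
    rcases List.mem_singleton.mp hu with rfl
    refine ⟨Or.inr rfl, PySem.Dict.getD_insert_self _ _ _ _, ?_⟩
    simp [PySem.Set.mem_ofList]
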